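-- pv_equiv track=rewrite | github.com/wanteddev/data-bolt | src/data_bolt/tasks/bigquery_agent/nodes.py | _build_preview_table
-- ===== SOURCE A (Python) =====
-- from typing import Any, cast
--
-- def _preview_cell(value: Any, max_len: int = 32) -> str:
--     text = "-" if value is None else str(value)
--     single_line = " ".join(text.split())
--     if len(single_line) <= max_len:
--         return single_line
--     return f"{single_line[: max_len - 3]}..."
--
-- def _build_preview_table(
--     rows: list[dict[str, Any]], max_rows: int = 8, max_cols: int = 6
-- ) -> str | None:
--     if not rows:
--         return None
--     first_row = rows[0]
--     columns = [str(key) for key in first_row.keys()][:max_cols]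
--     if not columns:
--         return None
--
--     sample_rows = rows[:max_rows]
--     cell_rows = [[_preview_cell(row.get(column)) for column in columns] for row in sample_rows]
--     widths = []
--     for index, column in enumerate(columns):
--         column_width = len(column)
--         for cells in cell_rows:
--             column_width = max(column_width, len(cells[index]))
--         widths.append(column_width)
--
--     header = " | ".join(column.ljust(widths[index]) for index, column in enumerate(columns))
--     divider = "-+-".join("-" * widths[index] for index in range(len(columns)))
--     body = [
--         " | ".join(cells[index].ljust(widths[index]) for index in range(len(columns)))
--         for cells in cell_rows
--     ]
--     return "\n".join([header, divider, *body])
-- ===== SOURCE B (Python) =====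
-- from typing import Any
--
-- def _preview_cell(value: Any, max_len: int = 32) -> str:
--     text = "-" if value is None else str(value)
--     single_line = " ".join(text.split())
--     if len(single_line) <= max_len:
--         return single_line
--     return f"{single_line[: max_len - 3]}..."
--
-- def _build_preview_table(
--     rows: list[dict[str, Any]], max_rows: int = 8, max_cols: int = 6
-- ) -> str | None:
--     # B: build the table column-by-column as vertical strips (header, dashes,
--     # padded cells), each padded to its own local width, then transpose the
--     # strips with zip(*...) and join each line with its separator.
--     if not rows:
--         return None
--     columns = [str(key) for key in rows[0].keys()][:max_cols]
--     if not columns: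
--         return None
--     sample = rows[:max_rows]
--     strips = []
--     for column in columns:
--         cells = [_preview_cell(row.get(column)) for row in sample]
--         width = max([len(column)] + [len(cell) for cell in cells])
--         strips.append([column.ljust(width), "-" * width]
--                       + [cell.ljust(width) for cell in cells])
--     lines = ["-+-".join(parts) if index == 1 else " | ".join(parts)
--              for index, parts in enumerate(zip(*strips))]
--     return "\n".join(lines)
-- ===== Notes on version B (the rewrite author's own statement) =====
-- stated objective: alternative
-- what changed: B builds the table column-by-column: each column becomes a vertical strip [header.ljust(w), '-'*w, padded cells] with its width computed locally from that column's own cells, and the output lines are obtained by transposing the strips with zip(*strips) and joining each line with its separator chosen by line index; A instead builds a row-major cell grid, a separate widths list via a column-major running-max loop, and formats header/divider/body individually by indexing widths.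
import Mathlib
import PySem

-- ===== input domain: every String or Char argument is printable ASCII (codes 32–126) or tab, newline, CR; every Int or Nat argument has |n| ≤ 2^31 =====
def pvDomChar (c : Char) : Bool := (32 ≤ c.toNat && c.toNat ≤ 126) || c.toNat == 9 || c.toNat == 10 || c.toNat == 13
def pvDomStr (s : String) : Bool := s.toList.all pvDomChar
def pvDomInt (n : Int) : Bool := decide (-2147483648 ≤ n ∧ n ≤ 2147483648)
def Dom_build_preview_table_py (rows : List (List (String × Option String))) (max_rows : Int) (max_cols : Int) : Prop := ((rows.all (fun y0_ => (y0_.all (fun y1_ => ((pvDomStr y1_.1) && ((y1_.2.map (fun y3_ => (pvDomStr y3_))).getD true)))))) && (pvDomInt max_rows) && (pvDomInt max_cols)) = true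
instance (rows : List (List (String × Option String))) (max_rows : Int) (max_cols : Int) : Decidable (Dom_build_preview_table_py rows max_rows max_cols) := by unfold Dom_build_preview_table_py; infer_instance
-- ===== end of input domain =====

-- B builds the table column-by-column as padded vertical strips with per-column local
-- widths and transposes them with zip(*strips); alternative decomposition, same cost.

-- ===== PORT A =====

-- shared module helper _preview_cell (called with the default max_len=32 only);
-- Python str values are ported as List Char
def previewCell (value : Option String) : List Char :=
  let text : List Char := match value with
    | none => ['-']                        -- "-" if value is None
    | some s => s.toList                   -- str(value) = value for a str
  let singleLine := PySem.Chars.join [' '] (PySem.Chars.split₀ text)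
  if PySem.Chars.len singleLine ≤ 32 then singleLine
  else PySem.List.slice singleLine none (some (32 - 3)) ++ ['.', '.', '.']

-- str.ljust(width) (no fillchar): exact — pads with spaces on the right, never truncates
def ljustChars (cs : List Char) (w : Int) : List Char :=
  cs ++ List.replicate (w - PySem.Chars.len cs).toNat ' '

def build_preview_table_py (rows : List (List (String × Option String))) (max_rows : Int) (max_cols : Int) : Option String :=
  match rows with
  | [] => none                                            -- if not rows: return None
  | first_row :: _ =>
    -- str(key) = key (keys are str); dicts are PySem.Dict assoc lists
    let columns := PySem.List.slice ((PySem.Dict.mk first_row).keys) none (some max_cols)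
    if columns = [] then none                             -- if not columns: return None
    else
      let sample_rows := PySem.List.slice rows none (some max_rows)
      let cell_rows := sample_rows.map (fun row =>
        columns.map (fun column => previewCell ((PySem.Dict.mk row).getD column none)))
      -- for index, column in enumerate(columns): running max over cell_rows
      -- cells[index] is always in range (each cells has len(columns) entries), so the
      -- IndexError branch of Python's cells[index] is unreachable; pyGetD default [] is never used
      let widths : List Int := (PySem.List.enumerate columns).map (fun ic =>
        cell_rows.foldl (fun w cells =>
          max w (PySem.Chars.len (PySem.List.pyGetD cells ic.1 []))) (PySem.Chars.len ic.2.toList))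
      let header := PySem.Chars.join [' ', '|', ' ']
        ((PySem.List.enumerate columns).map (fun ic =>
          ljustChars ic.2.toList (PySem.List.pyGetD widths ic.1 0)))
      let divider := PySem.Chars.join ['-', '+', '-']
        ((PySem.List.pyRange 0 (PySem.List.len columns)).map (fun i =>
          List.replicate (PySem.List.pyGetD widths i 0).toNat '-'))
      let body := cell_rows.map (fun cells =>
        PySem.Chars.join [' ', '|', ' ']
          ((PySem.List.pyRange 0 (PySem.List.len columns)).map (fun i =>
            ljustChars (PySem.List.pyGetD cells i []) (PySem.List.pyGetD widths i 0))))
      some (String.ofList (PySem.Chars.join ['\n'] (header :: divider :: body)))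

-- ===== PORT B =====

-- zip(*xss) over lists of lines: truncating transpose, as Python's zip
def pyZipStar (xss : List (List (List Char))) : List (List (List Char)) :=
  if h : xss = [] ∨ xss.any List.isEmpty then []
  else (xss.map (fun l => l.headD [])) :: pyZipStar (xss.map List.tail)
termination_by (xss.map List.length).sum
decreasing_by
  have hne : xss ≠ [] := fun h' => h (Or.inl h')
  have hall : ∀ l ∈ xss, l ≠ [] := by
    intro l hl hnil
    exact h (Or.inr (List.any_eq_true.mpr ⟨l, hl, by simp [hnil]⟩))
  have hup : List.map (fun x : {x // x ∈ xss} => x.val.tail) xss.attach = List.map List.tail xss := by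
    conv_rhs => rw [← List.attach_map_subtype_val xss]
    rw [List.map_map]
    rfl
  rw [hup, List.map_map]
  refine List.sum_lt_sum (List.length ∘ List.tail) List.length (fun l _ => ?_) ?_
  · simp only [Function.comp_apply, List.length_tail]; omega
  · obtain ⟨l, hl⟩ := List.exists_mem_of_ne_nil xss hne
    refine ⟨l, hl, ?_⟩
    have hlne := hall l hl
    cases l with
    | nil => exact absurd rfl hlne
    | cons a t => simp

def build_preview_table_py_alt (rows : List (List (String × Option String))) (max_rows : Int) (max_cols : Int) : Option String :=
  match rows with
  | [] => none
  | first_row :: _ =>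
    let columns := PySem.List.slice ((PySem.Dict.mk first_row).keys) none (some max_cols)
    if columns = [] then none
    else
      let sample := PySem.List.slice rows none (some max_rows)
      -- one vertical strip per column: padded header, dashes, padded cells
      let strips := columns.map (fun column =>
        let cells := sample.map (fun row => previewCell ((PySem.Dict.mk row).getD column none))
        -- Python max([len(column)] + lens) = fold of max over lens from len(column)
        let width := (cells.map PySem.Chars.len).foldl max (PySem.Chars.len column.toList)
        ljustChars column.toList width :: List.replicate width.toNat '-'
          :: cells.map (fun cell => ljustChars cell width))
      let lines := (PySem.List.enumerate (pyZipStar strips)).map (fun ip =>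
        if ip.1 == 1 then PySem.Chars.join ['-', '+', '-'] ip.2
        else PySem.Chars.join [' ', '|', ' '] ip.2)
      some (String.ofList (PySem.Chars.join ['\n'] lines))

-- ===== PRECONDITION & SPEC =====
def Spec_build_preview_table_py (rows : List (List (String × Option String))) (max_rows : Int) (max_cols : Int) (out : Option String) : Prop := out = build_preview_table_py_alt rows max_rows max_cols
instance (rows : List (List (String × Option String))) (max_rows : Int) (max_cols : Int) (out : Option String) : Decidable (Spec_build_preview_table_py rows max_rows max_cols out) := by unfold Spec_build_preview_table_py; infer_instance

-- ===== CLAIM (what is proved, stated in full; the proofs are below) =====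
def Claim_equal_build_preview_table_py : Prop := ∀ (rows : List (List (String × Option String))) (max_rows : Int) (max_cols : Int), Dom_build_preview_table_py rows max_rows max_cols → Spec_build_preview_table_py rows max_rows max_cols (build_preview_table_py rows max_rows max_cols)

-- ===== LEMMAS AND PROOFS =====

-- the common per-column width: max of the header length and the column's cell lengths
def Wfun {R : Type} (sample : List R) (f : R → String → List Char) (c : String) : Int :=
  ((sample.map (fun r => f r c)).map PySem.Chars.len).foldl max (PySem.Chars.len c.toList)

theorem pyRange0_length (n : Nat) : (PySem.List.pyRange 0 (n : Int)).length = n := by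
  rw [PySem.List.pyRange_zero_natCast]; simp

theorem pyRange0_getElem (n : Nat) (i : Nat) (h : i < (PySem.List.pyRange 0 (n : Int)).length) :
    (PySem.List.pyRange 0 (n : Int))[i] = (i : Int) := by
  simp [PySem.List.pyRange_zero_natCast]

-- one step of the transpose when every strip is a cons
theorem zipstar_cons (cols : List String) (h : cols ≠ []) (hd : String → List Char)
    (tl : String → List (List Char)) :
    pyZipStar (cols.map (fun c => hd c :: tl c)) = cols.map hd :: pyZipStar (cols.map tl) := by
  rw [pyZipStar]
  have hcond : ¬ ((cols.map (fun c => hd c :: tl c)) = []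
      ∨ (cols.map (fun c => hd c :: tl c)).any List.isEmpty) := by
    simp [h]
  rw [dif_neg hcond]
  simp [List.map_map, Function.comp_def]

-- transposing per-column cell strips gives back the row-major grid
theorem zipstar_maps {R : Type} (cols : List String) (h : cols ≠ []) (sample : List R)
    (g : R → String → List Char) :
    pyZipStar (cols.map (fun c => sample.map (fun r => g r c)))
      = sample.map (fun r => cols.map (g r)) := by
  induction sample with
  | nil =>
    cases cols with
    | nil => exact absurd rfl h
    | cons c cs => rw [pyZipStar]; simp
  | cons r rs ih =>
    have hstep : cols.map (fun c => (r :: rs).map (fun x => g x c))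
        = cols.map (fun c => g r c :: rs.map (fun x => g x c)) := rfl
    rw [hstep, zipstar_cons cols h _ _, ih]
    rfl

-- index-independent separator choice past the divider line
theorem sep_map (A B : List Char) : ∀ (body : List (List (List Char))) (s : Int), 2 ≤ s →
    (PySem.List.enumerate body s).map (fun ip =>
        if ip.1 == 1 then PySem.Chars.join A ip.2 else PySem.Chars.join B ip.2)
      = body.map (PySem.Chars.join B) := by
  intro body
  induction body with
  | nil => intro s _; simp [PySem.List.enumerate_nil]
  | cons x t ih =>
    intro s hs
    rw [PySem.List.enumerate_cons, List.map_cons, List.map_cons, ih (s + 1) (by omega)]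
    have : (s == 1) = false := by simp; omega
    rw [this]
    simp

-- A's enumerate-based widths list equals the per-column local widths
theorem widthsA_eq {R : Type} (cols : List String) (sample : List R) (f : R → String → List Char) :
    (PySem.List.enumerate cols).map (fun ic =>
        (sample.map (fun r => cols.map (fun c => f r c))).foldl (fun w cells =>
          max w (PySem.Chars.len (PySem.List.pyGetD cells ic.1 []))) (PySem.Chars.len ic.2.toList))
      = cols.map (Wfun sample f) := by
  apply List.ext_getElem
  · simp [PySem.List.length_enumerate]
  · intro i h1 h2
    rw [List.length_map, PySem.List.length_enumerate] at h1
    rw [List.getElem_map, List.getElem_map, PySem.List.getElem_enumerate]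
    rw [List.foldl_map]
    unfold Wfun
    rw [List.map_map, List.foldl_map]
    apply PySem.List.foldl_congr_mem
    intro acc r _
    have : PySem.List.pyGetD (cols.map (fun c => f r c)) ((0 : Int) + i) [] = f r cols[i] := by
      rw [zero_add, PySem.List.pyGetD_natCast, List.getD_eq_getElem _ _ (by simpa using h1),
          List.getElem_map]
    rw [this]
    rfl

theorem headerA_eq (cols : List String) (W : String → Int) :
    (PySem.List.enumerate cols).map (fun ic =>
        ljustChars ic.2.toList (PySem.List.pyGetD (cols.map W) ic.1 0))
      = cols.map (fun c => ljustChars c.toList (W c)) := by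
  apply List.ext_getElem
  · simp [PySem.List.length_enumerate]
  · intro i h1 h2
    rw [List.length_map, PySem.List.length_enumerate] at h1
    rw [List.getElem_map, List.getElem_map, PySem.List.getElem_enumerate]
    have : PySem.List.pyGetD (cols.map W) ((0 : Int) + i) 0 = W cols[i] := by
      rw [zero_add, PySem.List.pyGetD_natCast, List.getD_eq_getElem _ _ (by simpa using h1),
          List.getElem_map]
    rw [this]

theorem dividerA_eq (cols : List String) (W : String → Int) :
    (PySem.List.pyRange 0 (PySem.List.len cols)).map (fun i =>
        List.replicate (PySem.List.pyGetD (cols.map W) i 0).toNat '-')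
      = cols.map (fun c => List.replicate (W c).toNat '-') := by
  have hl : PySem.List.len cols = (cols.length : Int) := by simp [PySem.List.len]
  rw [hl]
  apply List.ext_getElem
  · simp
  · intro i h1 h2
    rw [List.length_map, pyRange0_length] at h1
    rw [List.getElem_map, pyRange0_getElem _ _ (by simpa [pyRange0_length] using h1),
        List.getElem_map, PySem.List.pyGetD_natCast,
        List.getD_eq_getElem _ _ (by simpa using h1), List.getElem_map]

theorem rowA_eq (cols : List String) (W : String → Int) (cell : String → List Char) :
    (PySem.List.pyRange 0 (PySem.List.len cols)).map (fun i =>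
        ljustChars (PySem.List.pyGetD (cols.map (fun c => cell c)) i [])
          (PySem.List.pyGetD (cols.map W) i 0))
      = cols.map (fun c => ljustChars (cell c) (W c)) := by
  have hl : PySem.List.len cols = (cols.length : Int) := by simp [PySem.List.len]
  rw [hl]
  apply List.ext_getElem
  · simp
  · intro i h1 h2
    rw [List.length_map, pyRange0_length] at h1
    rw [List.getElem_map, pyRange0_getElem _ _ (by simpa [pyRange0_length] using h1),
        List.getElem_map, PySem.List.pyGetD_natCast, PySem.List.pyGetD_natCast,
        List.getD_eq_getElem _ _ (by simpa using h1),
        List.getD_eq_getElem _ _ (by simpa using h1), List.getElem_map, List.getElem_map]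

-- both halves, abstracted over the cell function f (= _preview_cell of the looked-up value)
theorem tableEq {R : Type} (cols : List String) (hc : cols ≠ []) (sample : List R)
    (f : R → String → List Char) :
    (PySem.Chars.join ['\n']
      (PySem.Chars.join [' ', '|', ' ']
          ((PySem.List.enumerate cols).map (fun ic =>
            ljustChars ic.2.toList (PySem.List.pyGetD
              ((PySem.List.enumerate cols).map (fun ic =>
                (sample.map (fun r => cols.map (fun c => f r c))).foldl (fun w cells =>
                  max w (PySem.Chars.len (PySem.List.pyGetD cells ic.1 [])))
                  (PySem.Chars.len ic.2.toList))) ic.1 0)))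
        :: PySem.Chars.join ['-', '+', '-']
          ((PySem.List.pyRange 0 (PySem.List.len cols)).map (fun i =>
            List.replicate (PySem.List.pyGetD
              ((PySem.List.enumerate cols).map (fun ic =>
                (sample.map (fun r => cols.map (fun c => f r c))).foldl (fun w cells =>
                  max w (PySem.Chars.len (PySem.List.pyGetD cells ic.1 [])))
                  (PySem.Chars.len ic.2.toList))) i 0).toNat '-'))
        :: (sample.map (fun r => cols.map (fun c => f r c))).map (fun cells =>
            PySem.Chars.join [' ', '|', ' ']
              ((PySem.List.pyRange 0 (PySem.List.len cols)).map (fun i =>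
                ljustChars (PySem.List.pyGetD cells i []) (PySem.List.pyGetD
                  ((PySem.List.enumerate cols).map (fun ic =>
                    (sample.map (fun r => cols.map (fun c => f r c))).foldl (fun w cells =>
                      max w (PySem.Chars.len (PySem.List.pyGetD cells ic.1 [])))
                      (PySem.Chars.len ic.2.toList))) i 0)))))
    = PySem.Chars.join ['\n']
        ((PySem.List.enumerate (pyZipStar (cols.map (fun column =>
            ljustChars column.toList
                ((((sample.map (fun row => f row column)).map PySem.Chars.len)).foldl max
                  (PySem.Chars.len column.toList))
              :: List.replicate ((((sample.map (fun row => f row column)).map PySem.Chars.len)).foldl max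
                  (PySem.Chars.len column.toList)).toNat '-'
              :: (sample.map (fun row => f row column)).map (fun cell =>
                  ljustChars cell ((((sample.map (fun row => f row column)).map PySem.Chars.len)).foldl max
                    (PySem.Chars.len column.toList))))))).map (fun ip =>
          if ip.1 == 1 then PySem.Chars.join ['-', '+', '-'] ip.2
          else PySem.Chars.join [' ', '|', ' '] ip.2))) := by
  rw [widthsA_eq cols sample f, headerA_eq cols (Wfun sample f), dividerA_eq cols (Wfun sample f)]
  -- A's body rows
  have hbody : (sample.map (fun r => cols.map (fun c => f r c))).map (fun cells =>
        PySem.Chars.join [' ', '|', ' ']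
          ((PySem.List.pyRange 0 (PySem.List.len cols)).map (fun i =>
            ljustChars (PySem.List.pyGetD cells i [])
              (PySem.List.pyGetD (cols.map (Wfun sample f)) i 0))))
      = sample.map (fun r => PySem.Chars.join [' ', '|', ' ']
          (cols.map (fun c => ljustChars (f r c) (Wfun sample f c)))) := by
    rw [List.map_map]
    apply List.map_congr_left
    intro r _
    simp only [Function.comp_apply]
    exact congrArg _ (rowA_eq cols (Wfun sample f) (fun c => f r c))
  rw [hbody]
  -- B's strips, rewritten to the common per-column form
  have hstrips : cols.map (fun column =>
        ljustChars column.toList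
            ((((sample.map (fun row => f row column)).map PySem.Chars.len)).foldl max
              (PySem.Chars.len column.toList))
          :: List.replicate ((((sample.map (fun row => f row column)).map PySem.Chars.len)).foldl max
              (PySem.Chars.len column.toList)).toNat '-'
          :: (sample.map (fun row => f row column)).map (fun cell =>
              ljustChars cell ((((sample.map (fun row => f row column)).map PySem.Chars.len)).foldl max
                (PySem.Chars.len column.toList))))
      = cols.map (fun c => ljustChars c.toList (Wfun sample f c)
          :: (fun c => List.replicate (Wfun sample f c).toNat '-'
              :: sample.map (fun r => ljustChars (f r c) (Wfun sample f c))) c) := by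
    apply List.map_congr_left
    intro c _
    simp only [Wfun, List.map_map, Function.comp_def]
  rw [hstrips, zipstar_cons cols hc _ _, zipstar_cons cols hc _ _,
      zipstar_maps cols hc sample (fun r c => ljustChars (f r c) (Wfun sample f c)),
      PySem.List.enumerate_cons, PySem.List.enumerate_cons, List.map_cons, List.map_cons,
      sep_map _ _ _ ((0 : Int) + 1 + 1) (by omega)]
  have h0 : ((0 : Int) == 1) = false := by decide
  have h1 : ((0 : Int) + 1 == 1) = true := by decide
  rw [h0, h1]
  simp only [Bool.false_eq_true, if_false, if_true]
  rw [List.map_map]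
  rfl

theorem main_eq (rows : List (List (String × Option String))) (max_rows : Int) (max_cols : Int) :
    build_preview_table_py rows max_rows max_cols = build_preview_table_py_alt rows max_rows max_cols := by
  cases rows with
  | nil => rfl
  | cons first rest =>
    unfold build_preview_table_py build_preview_table_py_alt
    by_cases hc : PySem.List.slice ((PySem.Dict.mk first).keys) none (some max_cols) = []
    · simp only [hc, reduceIte]
    · simp only [if_neg hc]
      exact congrArg (fun l => some (String.ofList l))
        (tableEq (PySem.List.slice ((PySem.Dict.mk first).keys) none (some max_cols)) hc
          (PySem.List.slice (first :: rest) none (some max_rows))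
          (fun r c => previewCell ((PySem.Dict.mk r).getD c none)))

-- ===== VERDICT (by name: the statement is the Claim_ definition above) =====
theorem build_preview_table_py_spec : Claim_equal_build_preview_table_py := by
  intro rows max_rows max_cols _
  exact main_eq rows max_rows max_cols
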